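-- pv_equiv track=rewrite | github.com/stutim04/comp110-23f-workspace | lessons/practicing.py | odd_and_even
-- ===== SOURCE A (Python) =====
-- def odd_and_even(name_1: list[int]) -> list[int]:
--     new_list: list[int] = []
--     ind_tracker: int = 0
--     for elem in name_1:
--         if elem % 2 == 1 and ind_tracker % 2 == 0:
--             new_list.append(elem)
--         ind_tracker += 1
--     return new_list
-- ===== SOURCE B (Python) =====
-- def odd_and_even(name_1: list[int]) -> list[int]:
--     # Two stages: positional selection by slicing, then a value filter.
--     even = name_1[::2]
--     return [x for x in even if x % 2 == 1]
-- ===== Notes on version B (the rewrite author's own statement) =====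
-- stated objective: simpler
-- what changed: Replaces the single loop with a manual index counter by two separate stages: a stride-2 slice selecting the even positions, then a plain value filter for odd elements.
import Mathlib
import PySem

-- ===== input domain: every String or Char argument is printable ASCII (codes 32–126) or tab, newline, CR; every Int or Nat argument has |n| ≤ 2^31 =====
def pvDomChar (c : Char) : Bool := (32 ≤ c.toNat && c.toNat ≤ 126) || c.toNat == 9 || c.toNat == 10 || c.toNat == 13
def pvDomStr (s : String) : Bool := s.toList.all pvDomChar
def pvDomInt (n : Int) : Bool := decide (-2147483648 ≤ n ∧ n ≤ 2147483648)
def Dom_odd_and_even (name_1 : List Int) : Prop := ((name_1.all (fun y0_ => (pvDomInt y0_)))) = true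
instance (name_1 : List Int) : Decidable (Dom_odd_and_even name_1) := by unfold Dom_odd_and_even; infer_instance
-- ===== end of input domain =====

-- B replaces A's single loop with an index counter by two stages (stride-2 slice, then a value
-- filter); objective: simpler. Equivalence of the return values is proved for all inputs.

-- ===== PORT A =====
-- literal transliteration of A: one fold carrying (new_list, ind_tracker)
def odd_and_even (name_1 : List Int) : List Int :=
  (name_1.foldl
    (fun (st : List Int × Int) (elem : Int) =>
      if PySem.Int.mod elem 2 == 1 && PySem.Int.mod st.2 2 == 0
      then (st.1 ++ [elem], st.2 + 1)
      else (st.1, st.2 + 1))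
    ([], 0)).1

-- ===== PORT B =====
-- literal transliteration of Source B: even = name_1[::2] (a stride-2 slice; step ≠ 0 so the slice
-- always returns a value, getD [] only discharges the option), then filter for odd values
def odd_and_even_alt (name_1 : List Int) : List Int :=
  ((PySem.List.slice? name_1 none none 2).getD []).filter
    (fun x => PySem.Int.mod x 2 == 1)

-- ===== PRECONDITION & SPEC =====
def Spec_odd_and_even (name_1 : List Int) (out : List Int) : Prop := out = odd_and_even_alt name_1
instance (name_1 : List Int) (out : List Int) : Decidable (Spec_odd_and_even name_1 out) := by unfold Spec_odd_and_even; infer_instance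

-- ===== CLAIM (what is proved, stated in full; the proofs are below) =====
def Claim_equal_odd_and_even : Prop := ∀ (name_1 : List Int), Dom_odd_and_even name_1 → Spec_odd_and_even name_1 (odd_and_even name_1)

-- ===== LEMMAS AND PROOFS =====

-- proof-side characterisation of the stride-2 slice
def everyOther : List Int → List Int
  | [] => []
  | [a] => [a]
  | a :: _ :: rest => a :: everyOther rest

theorem everyOther_cons (a : Int) (l : List Int) :
    everyOther (a :: l) = a :: everyOther (l.drop 1) := by
  cases l <;> simp [everyOther]

theorem filterMap_range_everyOther (xs : List Int) :
    List.filterMap (fun k : Nat => xs[2 * k]?) (List.range ((xs.length + 1) / 2))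
      = everyOther xs := by
  induction xs using everyOther.induct with
  | case1 => simp [everyOther]
  | case2 a => norm_num [List.range_succ]; simp [everyOther]
  | case3 a b rest ih =>
    have hc : (((a :: b :: rest).length + 1) / 2) = ((rest.length + 1) / 2) + 1 := by
      simp only [List.length_cons]; omega
    rw [hc, List.range_succ_eq_map, List.filterMap_cons, List.filterMap_map]
    have : (fun k : Nat => (a :: b :: rest)[2 * (k + 1)]?) = (fun k : Nat => rest[2 * k]?) := by
      funext k
      have h2 : 2 * (k + 1) = (2 * k) + 2 := by omega
      rw [h2]
      simp
    simp [everyOther, ← ih, Nat.mul_add]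

theorem slice?_two (xs : List Int) :
    PySem.List.slice? xs none none 2 = some (everyOther xs) := by
  rw [← filterMap_range_everyOther]
  simp only [PySem.List.slice?, PySem.List.sliceIndices]
  norm_num
  have h1 : (fun x : Nat => xs[((2:Int) * (x:Int)).toNat]?) = (fun k : Nat => xs[2 * k]?) := by
    funext k; congr 1
  have h2 : (if 0 < xs.length then (((xs.length : Int) + 2 - 1) / 2).toNat else 0)
      = (xs.length + 1) / 2 := by
    split_ifs with h <;> omega
  rw [h1, h2]

-- the loop step of A's port
def stepA : (List Int × Int) → Int → (List Int × Int) :=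
  fun st elem =>
    if PySem.Int.mod elem 2 == 1 && PySem.Int.mod st.2 2 == 0
    then (st.1 ++ [elem], st.2 + 1)
    else (st.1, st.2 + 1)

theorem foldl_stepA_acc (xs : List Int) (acc : List Int) (i : Int) :
    (xs.foldl stepA (acc, i)).1 = acc ++ (xs.foldl stepA ([], i)).1 := by
  induction xs generalizing acc i with
  | nil => simp
  | cons e xs ih =>
    simp only [List.foldl_cons, stepA, List.nil_append]
    by_cases h : (PySem.Int.mod e 2 == 1 && PySem.Int.mod i 2 == 0) = true
    · rw [if_pos h, if_pos h, ih (acc ++ [e]) (i + 1), ih [e] (i + 1)]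
      simp
    · rw [if_neg h, if_neg h]
      exact ih acc (i + 1)

theorem mod2_succ_of_zero (i : Int) (h : PySem.Int.mod i 2 = 0) :
    PySem.Int.mod (i + 1) 2 = 1 := by
  simp only [PySem.Int.mod, Int.fmod_eq_emod] at *
  omega

theorem mod2_succ_of_one (i : Int) (h : PySem.Int.mod i 2 = 1) :
    PySem.Int.mod (i + 1) 2 = 0 := by
  simp only [PySem.Int.mod, Int.fmod_eq_emod] at *
  omega

theorem foldl_stepA_char (xs : List Int) :
    ∀ i : Int,
      (PySem.Int.mod i 2 = 0 →
        (xs.foldl stepA ([], i)).1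
          = (everyOther xs).filter (fun x => PySem.Int.mod x 2 == 1)) ∧
      (PySem.Int.mod i 2 = 1 →
        (xs.foldl stepA ([], i)).1
          = (everyOther (xs.drop 1)).filter (fun x => PySem.Int.mod x 2 == 1)) := by
  induction xs with
  | nil => intro i; constructor <;> intro _ <;> simp [everyOther]
  | cons e xs ih =>
    intro i
    constructor
    · intro h0
      have h1 := mod2_succ_of_zero i h0
      simp only [List.foldl_cons, stepA, List.nil_append]
      rw [everyOther_cons, List.filter_cons]
      cases hb : (PySem.Int.mod e 2 == 1 && PySem.Int.mod i 2 == 0) with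
      | true =>
        have he : (PySem.Int.mod e 2 == 1) = true := by
          rw [h0] at hb; simpa using hb
        rw [if_pos rfl, if_pos he, foldl_stepA_acc xs [e] (i + 1), (ih (i + 1)).2 h1]
        simp
      | false =>
        have he : (PySem.Int.mod e 2 == 1) = false := by
          rw [h0] at hb; simpa using hb
        rw [if_neg (by simp), if_neg (by rw [he]; simp)]
        exact (ih (i + 1)).2 h1
    · intro h1
      have h0 := mod2_succ_of_one i h1
      simp only [List.foldl_cons, stepA]
      rw [if_neg (by rw [h1]; simp)]
      simpa using (ih (i + 1)).1 h0

-- ===== VERDICT (by name: the statement is the Claim_ definition above) =====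
theorem odd_and_even_spec : Claim_equal_odd_and_even := by
  intro name_1 _
  unfold Spec_odd_and_even odd_and_even odd_and_even_alt
  rw [slice?_two]
  exact (foldl_stepA_char name_1 0).1 (by decide)
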